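-- pv_equiv track=rewrite | github.com/DrFabach/REformer | src/function.py | generate_common_parent_relations
-- ===== SOURCE A (Python) =====
-- def generate_common_parent_relations(relations):
--     parent_to_children = {}
--     for child,parent  in relations:
--         parent_to_children.setdefault(parent, set()).add(child)
--
--     common_parent_relations = set()
--     for parent, children in parent_to_children.items():
--         children_list = list(children)
--         for i in range(len(children_list)):
--             for j in range(i+1, len(children_list)):
--                 common_parent_relations.add((children_list[i], children_list[j]))
--                 common_parent_relations.add((children_list[j], children_list[i]))
--
--     return common_parent_relations
-- ===== SOURCE B (Python) =====
-- def generate_common_parent_relations(relations):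
--     out = set()
--     seen = []
--     for _, parent in relations:
--         if parent in seen:
--             continue
--         seen.append(parent)
--         kids = []
--         for child, p in relations:
--             if p == parent and child not in kids:
--                 kids.append(child)
--         rest = kids
--         while rest:
--             a = rest[0]
--             rest = rest[1:]
--             for b in rest:
--                 out.add((a, b))
--                 out.add((b, a))
--     return out
-- ===== Notes on version B (the rewrite author's own statement) =====
-- stated objective: alternative
-- what changed: Replaces A's dict-of-sets grouping index with a dict-free scan: parents are deduplicated on the fly via a seen list, each parent's distinct children are collected by re-filtering the relation list, and pairs are emitted by head/tail recursion over the children list instead of an index double loop.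
import Mathlib
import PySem

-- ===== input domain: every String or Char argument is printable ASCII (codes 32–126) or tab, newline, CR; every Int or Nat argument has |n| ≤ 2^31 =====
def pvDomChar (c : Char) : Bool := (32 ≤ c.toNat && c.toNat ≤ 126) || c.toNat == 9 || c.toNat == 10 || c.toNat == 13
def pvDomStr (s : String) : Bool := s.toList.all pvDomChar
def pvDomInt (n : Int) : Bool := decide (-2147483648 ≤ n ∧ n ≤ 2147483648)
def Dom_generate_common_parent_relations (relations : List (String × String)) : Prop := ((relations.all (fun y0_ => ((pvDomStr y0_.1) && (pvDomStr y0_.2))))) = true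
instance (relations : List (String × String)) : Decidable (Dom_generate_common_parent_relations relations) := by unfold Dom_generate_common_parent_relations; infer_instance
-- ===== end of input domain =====

-- B replaces A's dict-of-sets grouping index by a dict-free scan: seen-list parent dedup,
-- per-parent re-filtering of the relation list, head/tail pair emission (alternative decomposition).


-- ===== PORT A =====
-- the Python returns a set (compared as a finite set); its Lean value is the PySem.Set element list
def generate_common_parent_relations (relations : List (String × String)) : List (String × String) :=
  let parent_to_children : PySem.Dict String (PySem.Set String) :=
    relations.foldl (fun d cp => d.modify cp.2 PySem.Set.empty (fun s => PySem.Set.add s cp.1))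
      PySem.Dict.empty
  parent_to_children.items.foldl (fun acc pc =>
    (PySem.List.pyRange 0 (PySem.List.len pc.2)).foldl (fun acc i =>
      (PySem.List.pyRange (i + 1) (PySem.List.len pc.2)).foldl (fun acc j =>
        PySem.Set.add
          (PySem.Set.add acc (PySem.List.pyGetD pc.2 i "", PySem.List.pyGetD pc.2 j ""))
          (PySem.List.pyGetD pc.2 j "", PySem.List.pyGetD pc.2 i "")) acc) acc)
    PySem.Set.empty

-- ===== PORT B =====
-- 'for b in rest: out.add((a,b)); out.add((b,a))'
def pvEmit (out : PySem.Set (String × String)) (a : String) (rest : List String) :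
    PySem.Set (String × String) :=
  rest.foldl (fun out b => PySem.Set.add (PySem.Set.add out (a, b)) (b, a)) out

-- the 'while rest:' loop of Source B
def pvPairs : List String → PySem.Set (String × String) → PySem.Set (String × String)
  | [], out => out
  | a :: rest, out => pvPairs rest (pvEmit out a rest)

def generate_common_parent_relations_alt (relations : List (String × String)) :
    List (String × String) :=
  (relations.foldl (fun (st : List String × PySem.Set (String × String)) cp =>
      if st.1.contains cp.2 then st
      else
        (st.1 ++ [cp.2],
         pvPairs
           (relations.foldl (fun ks cq =>
              if cq.2 == cp.2 && !(ks.contains cq.1) then ks ++ [cq.1] else ks) [])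
           st.2))
    ([], PySem.Set.empty)).2

-- ===== PRECONDITION & SPEC =====
def Spec_generate_common_parent_relations (relations : List (String × String)) (out : List (String × String)) : Prop := out = generate_common_parent_relations_alt relations
instance (relations : List (String × String)) (out : List (String × String)) : Decidable (Spec_generate_common_parent_relations relations out) := by unfold Spec_generate_common_parent_relations; infer_instance

-- ===== CLAIM (what is proved, stated in full; the proofs are below) =====
def Claim_equal_generate_common_parent_relations : Prop := ∀ (relations : List (String × String)), Dom_generate_common_parent_relations relations → Spec_generate_common_parent_relations relations (generate_common_parent_relations relations)

-- ===== LEMMAS AND PROOFS =====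

-- B's inner kids-collection loop is Set.update of the filtered children
theorem kids_loop (p : String) (l : List (String × String)) :
    ∀ ks : List String,
      l.foldl (fun ks cq =>
          if cq.2 == p && !(ks.contains cq.1) then ks ++ [cq.1] else ks) ks
        = PySem.Set.update ks ((l.filter (fun cq => cq.2 == p)).map Prod.fst) := by
  induction l with
  | nil => intro ks; simp [PySem.Set.update]
  | cons cq l ih =>
    intro ks
    by_cases h : cq.2 = p
    · have hinit : (if (cq.2 == p) && !(ks.contains cq.1) then ks ++ [cq.1] else ks)
          = PySem.Set.add ks cq.1 := by
        cases hc : ks.contains cq.1 <;> simp_all [PySem.Set.add]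
      simp only [List.foldl_cons]
      rw [hinit, ih, List.filter_cons_of_pos (by simp [h])]
      simp [PySem.Set.update]
    · have hb : (cq.2 == p) = false := by simp [h]
      rw [List.foldl_cons]
      have hinit : (if (cq.2 == p) && !(ks.contains cq.1) then ks ++ [cq.1] else ks) = ks := by
        rw [hb]; simp
      rw [hinit, ih, List.filter_cons_of_neg (by simp [hb])]

-- A's grouping fold: the child set stored at parent c
theorem groupD (l : List (String × String)) :
    ∀ (d : PySem.Dict String (PySem.Set String)) (c : String),
      (l.foldl (fun d cp => d.modify cp.2 PySem.Set.empty (fun s => PySem.Set.add s cp.1)) d).getD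
          c PySem.Set.empty
        = PySem.Set.update (d.getD c PySem.Set.empty)
            ((l.filter (fun cq => cq.2 == c)).map Prod.fst) := by
  induction l with
  | nil => intro d c; simp [PySem.Set.update]
  | cons cp l ih =>
    intro d c
    rw [List.foldl_cons, ih]
    by_cases h : cp.2 = c
    · subst h
      rw [PySem.Dict.getD_modify_self, List.filter_cons_of_pos (by simp)]
      simp [PySem.Set.update]
    · rw [PySem.Dict.getD_modify_of_ne _ _ _ (fun hh => h hh.symm),
        List.filter_cons_of_neg (by simp [h])]

-- A's index double loop, in List.range form, is head/tail pair recursion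
theorem range_pairs (cl : List String) :
    ∀ acc : PySem.Set (String × String),
      (List.range cl.length).foldl (fun acc k =>
          (cl.drop (k + 1)).foldl (fun acc b =>
            PySem.Set.add (PySem.Set.add acc (cl.getD k "", b)) (b, cl.getD k "")) acc) acc
        = pvPairs cl acc := by
  induction cl with
  | nil => intro acc; simp [pvPairs]
  | cons a rest ih =>
    intro acc
    rw [show (a :: rest).length = rest.length + 1 from rfl, List.range_succ_eq_map,
      List.foldl_cons, List.foldl_map]
    simp only [Nat.zero_add, List.drop_succ_cons, List.drop_zero, List.getD_cons_zero,
      List.getD_cons_succ]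
    rw [ih]
    rfl

-- A's pyRange double loop = pvPairs
theorem double_loop (cl : List String) (acc : PySem.Set (String × String)) :
    (PySem.List.pyRange 0 (PySem.List.len cl)).foldl (fun acc i =>
        (PySem.List.pyRange (i + 1) (PySem.List.len cl)).foldl (fun acc j =>
          PySem.Set.add
            (PySem.Set.add acc (PySem.List.pyGetD cl i "", PySem.List.pyGetD cl j ""))
            (PySem.List.pyGetD cl j "", PySem.List.pyGetD cl i "")) acc) acc
      = pvPairs cl acc := by
  rw [PySem.List.foldl_congr_mem _ _
    (fun acc i => (cl.drop (i.toNat + 1)).foldl (fun acc b =>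
      PySem.Set.add (PySem.Set.add acc (PySem.List.pyGetD cl i "", b))
        (b, PySem.List.pyGetD cl i "")) acc) _
    (by
      intro acc i hi
      have h0 : (0 : Int) ≤ i := (PySem.List.mem_pyRange_one.mp hi).1
      have h1 : (0 : Int) ≤ i + 1 := by omega
      have := PySem.List.foldl_pyRange_pyGetD cl ""
        (fun acc b => PySem.Set.add (PySem.Set.add acc (PySem.List.pyGetD cl i "", b))
          (b, PySem.List.pyGetD cl i "")) acc h1
      rw [this, show ((i : Int) + 1).toNat = i.toNat + 1 by omega])]
  rw [PySem.List.pyRange_one, List.foldl_map]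
  have hlen : ((PySem.List.len cl) - 0).toNat = cl.length := by
    simp [PySem.List.len]
  rw [hlen]
  have hbody : (fun (acc : PySem.Set (String × String)) (k : Nat) =>
      (cl.drop (((0 : Int) + ↑k).toNat + 1)).foldl (fun acc b =>
        PySem.Set.add (PySem.Set.add acc (PySem.List.pyGetD cl ((0 : Int) + ↑k) "", b))
          (b, PySem.List.pyGetD cl ((0 : Int) + ↑k) "")) acc)
      = (fun (acc : PySem.Set (String × String)) (k : Nat) =>
      (cl.drop (k + 1)).foldl (fun acc b =>
        PySem.Set.add (PySem.Set.add acc (cl.getD k "", b)) (b, cl.getD k "")) acc) := by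
    funext acc k
    have : ((0 : Int) + ↑k) = (k : Int) := by omega
    rw [this, PySem.List.pyGetD_natCast]
    simp
  rw [hbody]
  exact range_pairs cl acc

-- Set.update only appends new elements
theorem update_append {α : Type} [BEq α] [LawfulBEq α] (l : List α) :
    ∀ s : PySem.Set α, ∃ t, PySem.Set.update s l = s ++ t := by
  induction l with
  | nil => intro s; exact ⟨[], by simp [PySem.Set.update]⟩
  | cons x l ih =>
    intro s
    by_cases h : x ∈ s
    · obtain ⟨t, ht⟩ := ih s
      refine ⟨t, ?_⟩
      simpa [PySem.Set.update, PySem.Set.add, h] using ht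
    · obtain ⟨t, ht⟩ := ih (s ++ [x])
      refine ⟨x :: t, ?_⟩
      have : PySem.Set.update s (x :: l) = PySem.Set.update (s ++ [x]) l := by
        simp [PySem.Set.update, PySem.Set.add, h]
      rw [this, ht]
      simp

-- B's seen-guarded outer loop processes each parent once, in first-occurrence order
theorem seen_loop (K : String → PySem.Set (String × String) → PySem.Set (String × String))
    (ps : List (String × String)) :
    ∀ (seen : List String) (out : PySem.Set (String × String)),
      ps.foldl (fun st cp =>
          if st.1.contains cp.2 then st else (st.1 ++ [cp.2], K cp.2 st.2)) (seen, out)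
        = (PySem.Set.update seen (ps.map Prod.snd),
           ((PySem.Set.update seen (ps.map Prod.snd)).drop seen.length).foldl
             (fun out p => K p out) out) := by
  induction ps with
  | nil => intro seen out; simp [PySem.Set.update]
  | cons cp ps ih =>
    intro seen out
    rw [List.foldl_cons]
    by_cases h : cp.2 ∈ seen
    · have hc : seen.contains cp.2 = true := by simpa using h
      have hupd : PySem.Set.update seen (cp.2 :: ps.map Prod.snd)
          = PySem.Set.update seen (ps.map Prod.snd) := by
        simp [PySem.Set.update, PySem.Set.add, h]
      simp only [List.map_cons, hc, if_true, ih, hupd]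
    · have hc : seen.contains cp.2 = false := by simpa using h
      have hupd : PySem.Set.update seen (cp.2 :: ps.map Prod.snd)
          = PySem.Set.update (seen ++ [cp.2]) (ps.map Prod.snd) := by
        simp [PySem.Set.update, PySem.Set.add, h]
      obtain ⟨t, ht⟩ := update_append (ps.map Prod.snd) (seen ++ [cp.2])
      have hdrop1 : (PySem.Set.update (seen ++ [cp.2]) (ps.map Prod.snd)).drop seen.length
          = cp.2 :: t := by
        rw [ht, List.append_assoc, List.drop_left]
        rfl
      have hdrop2 : (PySem.Set.update (seen ++ [cp.2]) (ps.map Prod.snd)).drop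
          (seen ++ [cp.2]).length = t := by
        rw [ht, List.drop_left]
      simp only [List.map_cons, hc, Bool.false_eq_true, if_false, ih, hupd, hdrop1, hdrop2]
      simp

-- ===== VERDICT (by name: the statement is the Claim_ definition above) =====
theorem generate_common_parent_relations_spec : Claim_equal_generate_common_parent_relations := by
  intro relations _
  unfold Spec_generate_common_parent_relations
  unfold generate_common_parent_relations generate_common_parent_relations_alt
  -- B side: collapse the kids loop, then the seen loop
  simp only [kids_loop]
  rw [seen_loop (fun p out => pvPairs (PySem.Set.update []
    ((relations.filter (fun cq => cq.2 == p)).map Prod.fst)) out) relations [] PySem.Set.empty]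
  -- A side: characterize the dict, then collapse the double loop
  have hkeys := PySem.Dict.keys_foldl_modify_key relations Prod.snd PySem.Set.empty
    (fun _ cp => fun s => PySem.Set.add s cp.1) PySem.Dict.empty
  have hnodup := PySem.Dict.nodup_keys_foldl_modify_key relations Prod.snd PySem.Set.empty
    (fun _ cp => fun s => PySem.Set.add s cp.1) PySem.Dict.empty
    (by simp [PySem.Dict.keys_empty])
  rw [PySem.Dict.items_eq_map_keys _ hnodup PySem.Set.empty, List.foldl_map, hkeys]
  simp only [double_loop, groupD, PySem.Dict.getD_empty, PySem.Dict.keys_empty]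
  rfl
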